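-- pv_equiv track=rewrite | github.com/rudh-jh/PepDB | SCR/scripts/biopep_uwm_experimental_ace_downloader.py | extract_next_nonempty_line
-- ===== SOURCE A (Python) =====
-- from typing import Dict, List, Optional, Tuple
--
-- def extract_next_nonempty_line(lines: List[str], label: str) -> str:
--     for idx, line in enumerate(lines):
--         if line == label:
--             for j in range(idx + 1, len(lines)):
--                 val = lines[j].strip()
--                 if val:
--                     return val
--     return ""
-- ===== SOURCE B (Python) =====
-- def extract_next_nonempty_line(lines, label):
--     seen = False
--     for line in lines:
--         if seen:
--             val = line.strip()
--             if val:
--                 return val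
--         if line == label:
--             seen = True
--     return ""
-- ===== Notes on version B (the rewrite author's own statement) =====
-- stated objective: simpler
-- what changed: Replaced the outer find-plus-inner index scan with one flat pass over the lines that maintains a seen_label flag and returns the first truthy stripped line after the first label match.
import Mathlib
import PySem

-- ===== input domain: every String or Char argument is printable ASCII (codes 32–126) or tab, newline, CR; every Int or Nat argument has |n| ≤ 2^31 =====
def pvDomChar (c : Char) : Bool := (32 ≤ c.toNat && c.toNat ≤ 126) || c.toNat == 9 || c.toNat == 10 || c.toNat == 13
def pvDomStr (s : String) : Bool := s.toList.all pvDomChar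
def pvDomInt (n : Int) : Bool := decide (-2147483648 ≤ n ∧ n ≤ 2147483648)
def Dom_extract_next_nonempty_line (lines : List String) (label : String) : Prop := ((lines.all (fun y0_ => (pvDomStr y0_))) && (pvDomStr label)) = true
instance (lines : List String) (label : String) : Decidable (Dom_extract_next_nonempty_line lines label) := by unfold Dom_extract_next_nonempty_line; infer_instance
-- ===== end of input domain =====

-- B replaces A's outer find-plus-inner index scan by one flat pass carrying a seen-label flag (objective: simpler).

-- ===== PORT A =====
-- inner loop: for j in range(idx+1, len(lines)): val = lines[j].strip(); if val: return val
def pvInnerA (lines : List String) : List Int → Option String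
  | [] => none
  | j :: js =>
    let val := PySem.Str.strip (PySem.List.pyGetD lines j "")
    if val ≠ "" then some val else pvInnerA lines js

-- outer loop: for idx, line in enumerate(lines): if line == label: <inner>
def pvOuterA (lines : List String) (label : String) : List (Int × String) → String
  | [] => ""
  | (idx, line) :: rest =>
    if line = label then
      match pvInnerA lines (PySem.List.pyRange (idx + 1) lines.length 1) with
      | some v => v
      | none => pvOuterA lines label rest
    else pvOuterA lines label rest

def extract_next_nonempty_line (lines : List String) (label : String) : String :=
  pvOuterA lines label (PySem.List.enumerate lines)

-- ===== PORT B =====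
-- one pass with a boolean seen-label flag
def pvLoopB (label : String) : List String → Bool → String
  | [], _ => ""
  | line :: rest, seen =>
    if seen then
      let val := PySem.Str.strip line
      if val ≠ "" then val
      else pvLoopB label rest (if line = label then true else seen)
    else pvLoopB label rest (if line = label then true else seen)

def extract_next_nonempty_line_alt (lines : List String) (label : String) : String :=
  pvLoopB label lines false

-- ===== PRECONDITION & SPEC =====
def Spec_extract_next_nonempty_line (lines : List String) (label : String) (out : String) : Prop := out = extract_next_nonempty_line_alt lines label
instance (lines : List String) (label : String) (out : String) : Decidable (Spec_extract_next_nonempty_line lines label out) := by unfold Spec_extract_next_nonempty_line; infer_instance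

-- ===== CLAIM (what is proved, stated in full; the proofs are below) =====
def Claim_equal_extract_next_nonempty_line : Prop := ∀ (lines : List String) (label : String), Dom_extract_next_nonempty_line lines label → Spec_extract_next_nonempty_line lines label (extract_next_nonempty_line lines label)

-- ===== LEMMAS AND PROOFS =====

-- the first nonempty stripped line of a list (reference function for both proofs)
def pvFirstNE : List String → Option String
  | [] => none
  | l :: rest => if PySem.Str.strip l ≠ "" then some (PySem.Str.strip l) else pvFirstNE rest

theorem pvFirstNE_none_iff (xs : List String) :
    pvFirstNE xs = none ↔ ∀ x ∈ xs, PySem.Str.strip x = "" := by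
  induction xs with
  | nil => simp [pvFirstNE]
  | cons l rest ih =>
    simp only [pvFirstNE, List.mem_cons]
    by_cases h : PySem.Str.strip l = ""
    · simp [h, ih]
    · simp [h]

-- A's inner index loop computes the first nonempty stripped line of the suffix
theorem pvInnerA_eq (lines : List String) (i : Nat) :
    pvInnerA lines (PySem.List.pyRange (i : Int) lines.length 1) = pvFirstNE (lines.drop i) := by
  induction hn : lines.length - i generalizing i with
  | zero =>
    have hle : lines.length ≤ i := by omega
    rw [PySem.List.pyRange_one_eq_nil (by exact_mod_cast hle)]
    rw [List.drop_eq_nil_of_le hle]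
    rfl
  | succ n ih =>
    have hi : i < lines.length := by omega
    rw [PySem.List.pyRange_one_cons (by exact_mod_cast hi)]
    have hget : PySem.List.pyGetD lines (i : Int) "" = lines[i] := by
      rw [PySem.List.pyGetD_natCast]
      simp [List.getD, hi]
    have hdrop : lines.drop i = lines[i] :: lines.drop (i + 1) :=
      List.drop_eq_getElem_cons hi
    have hcast : ((i : Int) + 1) = ((i + 1 : Nat) : Int) := by push_cast; ring
    rw [hdrop]
    simp only [pvInnerA, pvFirstNE, hget, hcast]
    by_cases h : PySem.Str.strip lines[i] = ""
    · simp only [h, ne_eq, not_true_eq_false, if_false]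
      exact ih (i + 1) (by omega)
    · simp [h]

-- B's loop with the flag already set returns the first nonempty stripped line
theorem pvLoopB_true (label : String) (xs : List String) :
    pvLoopB label xs true = (pvFirstNE xs).getD "" := by
  induction xs with
  | nil => rfl
  | cons l rest ih =>
    simp only [pvLoopB, pvFirstNE]
    by_cases h : PySem.Str.strip l = ""
    · simp only [h, ne_eq, not_true_eq_false, if_false]
      rw [show (if l = label then true else true) = true by split <;> rfl]
      exact ih
    · simp [h]

-- A's outer loop returns "" once every remaining line strips to ""
theorem pvOuterA_all_blank (label : String) :
    ∀ (rest pre : List String), (∀ x ∈ rest, PySem.Str.strip x = "") →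
    pvOuterA (pre ++ rest) label (PySem.List.enumerate rest (pre.length : Int)) = "" := by
  intro rest
  induction rest with
  | nil => intro pre _; rfl
  | cons l rest' ih =>
    intro pre hblank
    rw [PySem.List.enumerate_cons]
    have hassoc : pre ++ l :: rest' = (pre ++ [l]) ++ rest' := by simp
    have hlen : ((pre ++ [l]).length : Int) = (pre.length : Int) + 1 := by
      simp [List.length_append]
    have hblank' : ∀ x ∈ rest', PySem.Str.strip x = "" := fun x hx =>
      hblank x (List.mem_cons_of_mem l hx)
    have hrec : pvOuterA (pre ++ l :: rest') label
        (PySem.List.enumerate rest' ((pre.length : Int) + 1)) = "" := by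
      rw [hassoc, ← hlen]
      exact ih (pre ++ [l]) hblank'
    by_cases hl : l = label
    · subst hl
      have hdrop : (pre ++ l :: rest').drop (pre ++ [l]).length = rest' := by
        rw [hassoc]; exact List.drop_left
      have hinner : pvInnerA (pre ++ l :: rest')
          (PySem.List.pyRange ((pre.length : Int) + 1) (pre ++ l :: rest').length 1) = none := by
        rw [← hlen, pvInnerA_eq, hdrop]
        exact (pvFirstNE_none_iff rest').mpr hblank'
      simp only [pvOuterA]
      rw [hinner]
      exact hrec
    · simp only [pvOuterA, if_neg hl]
      exact hrec

-- main induction: A's outer loop over the enumerated suffix equals B's loop with the flag unset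
theorem pvMain (label : String) :
    ∀ (rest pre : List String),
    pvOuterA (pre ++ rest) label (PySem.List.enumerate rest (pre.length : Int)) =
      pvLoopB label rest false := by
  intro rest
  induction rest with
  | nil => intro pre; rfl
  | cons l rest' ih =>
    intro pre
    rw [PySem.List.enumerate_cons]
    have hassoc : pre ++ l :: rest' = (pre ++ [l]) ++ rest' := by simp
    have hlen : ((pre ++ [l]).length : Int) = (pre.length : Int) + 1 := by
      simp [List.length_append]
    have hB : pvLoopB label (l :: rest') false =
        pvLoopB label rest' (if l = label then true else false) := by
      simp [pvLoopB]
    rw [hB]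
    by_cases hl : l = label
    · subst hl
      have hdrop : (pre ++ l :: rest').drop (pre ++ [l]).length = rest' := by
        rw [hassoc]; exact List.drop_left
      have hinner : pvInnerA (pre ++ l :: rest')
          (PySem.List.pyRange ((pre.length : Int) + 1) (pre ++ l :: rest').length 1) =
          pvFirstNE rest' := by
        rw [← hlen, pvInnerA_eq, hdrop]
      rw [if_pos rfl, pvLoopB_true]
      simp only [pvOuterA]
      rw [hinner]
      cases hfe : pvFirstNE rest' with
      | some v => rfl
      | none =>
        have hblank' : ∀ x ∈ rest', PySem.Str.strip x = "" :=
          (pvFirstNE_none_iff rest').mp hfe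
        have hrec : pvOuterA (pre ++ l :: rest') l
            (PySem.List.enumerate rest' ((pre.length : Int) + 1)) = "" := by
          rw [hassoc, ← hlen]
          exact pvOuterA_all_blank l rest' (pre ++ [l]) hblank'
        exact hrec
    · rw [if_neg hl]
      simp only [pvOuterA, if_neg hl]
      rw [hassoc, ← hlen]
      exact ih (pre ++ [l])

-- ===== VERDICT (by name: the statement is the Claim_ definition above) =====
theorem extract_next_nonempty_line_spec : Claim_equal_extract_next_nonempty_line := by
  intro lines label _
  unfold Spec_extract_next_nonempty_line extract_next_nonempty_line extract_next_nonempty_line_alt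
  have := pvMain label lines []
  simpa using this
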